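-- pv_equiv track=rewrite | github.com/jacksonhunter/vibereader-extension | scripts/convert_matrix.py | generate_semantic_themes
-- ===== SOURCE A (Python) =====
-- def generate_semantic_themes(theme_blocks):
--     """Generate themes_v2.css with semantic RGB variables"""
--
--     output = "/* Matrix Theme Variables - Semantic RGB Format */\n\n"
--
--     for theme_name, variables in theme_blocks.items():
--         if theme_name == 'nightdrive':
--             output += ":root {\n"
--         else:
--             output += f'[data-theme="{theme_name}"] {{\n'
--
--         # Map old variables to semantic scale
--         if 'primary' in variables:
--             output += f"  --primary-500: {variables['primary']};\n"
--         if 'secondary' in variables: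
--             output += f"  --secondary-500: {variables['secondary']};\n"
--         if 'accent' in variables:
--             output += f"  --accent-500: {variables['accent']};\n"
--
--         # Background system
--         if 'bg-primary' in variables:
--             output += f"  --bg-primary: {variables['bg-primary']};\n"
--         if 'bg-secondary' in variables:
--             output += f"  --bg-secondary: {variables['bg-secondary']};\n"
--         if 'bg-tertiary' in variables:
--             output += f"  --bg-tertiary: {variables['bg-tertiary']};\n"
--
--         # Text system
--         if 'text-primary' in variables:
--             output += f"  --text-primary: {variables['text-primary']};\n"
--         if 'text-secondary' in variables:
--             output += f"  --text-secondary: {variables['text-secondary']};\n"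
--         if 'text-accent' in variables:
--             output += f"  --text-accent: {variables['text-accent']};\n"
--
--         # Border system
--         if 'border-color' in variables:
--             output += f"  --border-primary: {variables['border-color']};\n"
--
--         # Glow system
--         if 'glow-primary' in variables:
--             output += f"  --glow-primary: {variables['glow-primary']};\n"
--         if 'glow-secondary' in variables:
--             output += f"  --glow-secondary: {variables['glow-secondary']};\n"
--
--         # Convenience variables for backwards compatibility
--         output += f"  --primary: rgb(var(--primary-500));\n"
--         output += f"  --secondary: rgb(var(--secondary-500));\n"
--         output += f"  --accent: rgb(var(--accent-500));\n"
--
--         output += "}\n\n"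
--
--     return output
-- ===== SOURCE B (Python) =====
-- # Inverted mapping: one pass over each theme's variables bucketing lines into
-- # numbered slots, then emit slots in sorted order (vs A's 12 ordered membership tests).
-- _RENAME = {
--     "primary": (0, "primary-500"),
--     "secondary": (1, "secondary-500"),
--     "accent": (2, "accent-500"),
--     "bg-primary": (3, "bg-primary"),
--     "bg-secondary": (4, "bg-secondary"),
--     "bg-tertiary": (5, "bg-tertiary"),
--     "text-primary": (6, "text-primary"),
--     "text-secondary": (7, "text-secondary"),
--     "text-accent": (8, "text-accent"),
--     "border-color": (9, "border-primary"),
--     "glow-primary": (10, "glow-primary"),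
--     "glow-secondary": (11, "glow-secondary"),
-- }
--
-- _TAIL = (
--     "  --primary: rgb(var(--primary-500));\n"
--     "  --secondary: rgb(var(--secondary-500));\n"
--     "  --accent: rgb(var(--accent-500));\n"
--     "}\n\n"
-- )
--
--
-- def generate_semantic_themes(theme_blocks):
--     """Generate themes_v2.css with semantic RGB variables"""
--     parts = ["/* Matrix Theme Variables - Semantic RGB Format */\n\n"]
--     for theme_name, variables in theme_blocks.items():
--         if theme_name == "nightdrive":
--             parts.append(":root {\n")
--         else:
--             parts.append(f'[data-theme="{theme_name}"] {{\n')
--         slots = {}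
--         for key, value in variables.items():
--             target = _RENAME.get(key)
--             if target is not None:
--                 slots.setdefault(target[0], f"  --{target[1]}: {value};\n")
--         for idx in sorted(slots):
--             parts.append(slots[idx])
--         parts.append(_TAIL)
--     return "".join(parts)
-- ===== Notes on version B (the rewrite author's own statement) =====
-- stated objective: alternative
-- what changed: Instead of A's 13 ordered inline membership tests per theme, B inverts the mapping: one pass over each theme's variables buckets rendered lines into numbered slots via a key->(position, css-name) dict, then emits slot values in sorted slot order.
import Mathlib
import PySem

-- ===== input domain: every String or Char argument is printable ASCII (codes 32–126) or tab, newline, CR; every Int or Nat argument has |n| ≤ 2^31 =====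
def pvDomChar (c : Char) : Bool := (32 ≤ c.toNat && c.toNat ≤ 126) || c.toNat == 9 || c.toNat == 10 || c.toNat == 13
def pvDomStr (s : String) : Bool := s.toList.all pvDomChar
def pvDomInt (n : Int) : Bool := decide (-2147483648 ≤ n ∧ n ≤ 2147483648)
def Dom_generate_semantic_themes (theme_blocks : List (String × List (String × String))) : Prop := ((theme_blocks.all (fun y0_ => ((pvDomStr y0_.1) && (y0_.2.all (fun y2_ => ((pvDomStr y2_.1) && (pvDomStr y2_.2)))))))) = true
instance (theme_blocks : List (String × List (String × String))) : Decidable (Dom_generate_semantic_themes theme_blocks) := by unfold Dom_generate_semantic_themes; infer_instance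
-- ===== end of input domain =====

-- B inverts A's mapping: one pass over the variables buckets lines into numbered slots, emitted in sorted slot order; objective: alternative.

-- ===== PORT A =====
-- Python dict lookup on the association list: first match (keys are unique in a Python dict).
def pvGetVar (vs : List (String × String)) (k : String) : Option String :=
  (vs.find? (fun p => p.1 == k)).map (·.2)

-- the body of A's for-loop, over the same accumulated output string
def pvABody (output : String) (p : String × List (String × String)) : String :=
    let theme_name := p.1
    let vars := p.2
    let output := output ++ (if theme_name == "nightdrive" then ":root {\n"
                             else "[data-theme=\"" ++ theme_name ++ "\"] {\n")
    let output := match pvGetVar vars "primary" with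
      | some v => output ++ "  --primary-500: " ++ v ++ ";\n" | none => output
    let output := match pvGetVar vars "secondary" with
      | some v => output ++ "  --secondary-500: " ++ v ++ ";\n" | none => output
    let output := match pvGetVar vars "accent" with
      | some v => output ++ "  --accent-500: " ++ v ++ ";\n" | none => output
    let output := match pvGetVar vars "bg-primary" with
      | some v => output ++ "  --bg-primary: " ++ v ++ ";\n" | none => output
    let output := match pvGetVar vars "bg-secondary" with
      | some v => output ++ "  --bg-secondary: " ++ v ++ ";\n" | none => output
    let output := match pvGetVar vars "bg-tertiary" with
      | some v => output ++ "  --bg-tertiary: " ++ v ++ ";\n" | none => output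
    let output := match pvGetVar vars "text-primary" with
      | some v => output ++ "  --text-primary: " ++ v ++ ";\n" | none => output
    let output := match pvGetVar vars "text-secondary" with
      | some v => output ++ "  --text-secondary: " ++ v ++ ";\n" | none => output
    let output := match pvGetVar vars "text-accent" with
      | some v => output ++ "  --text-accent: " ++ v ++ ";\n" | none => output
    let output := match pvGetVar vars "border-color" with
      | some v => output ++ "  --border-primary: " ++ v ++ ";\n" | none => output
    let output := match pvGetVar vars "glow-primary" with
      | some v => output ++ "  --glow-primary: " ++ v ++ ";\n" | none => output
    let output := match pvGetVar vars "glow-secondary" with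
      | some v => output ++ "  --glow-secondary: " ++ v ++ ";\n" | none => output
    let output := output ++ "  --primary: rgb(var(--primary-500));\n"
    let output := output ++ "  --secondary: rgb(var(--secondary-500));\n"
    let output := output ++ "  --accent: rgb(var(--accent-500));\n"
    output ++ "}\n\n"

def generate_semantic_themes (theme_blocks : List (String × List (String × String))) : String :=
  theme_blocks.foldl pvABody "/* Matrix Theme Variables - Semantic RGB Format */\n\n"

-- ===== PORT B =====
-- the _RENAME dict of Source B, in insertion order: key -> (slot position, css variable name)
def pvRenameTable : List (String × Nat × String) :=
  [("primary", 0, "primary-500"), ("secondary", 1, "secondary-500"), ("accent", 2, "accent-500"),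
   ("bg-primary", 3, "bg-primary"), ("bg-secondary", 4, "bg-secondary"), ("bg-tertiary", 5, "bg-tertiary"),
   ("text-primary", 6, "text-primary"), ("text-secondary", 7, "text-secondary"), ("text-accent", 8, "text-accent"),
   ("border-color", 9, "border-primary"),
   ("glow-primary", 10, "glow-primary"), ("glow-secondary", 11, "glow-secondary")]

-- _RENAME.get(key): dict lookup = first match on the association list
def pvRenameGet (k : String) : Option (Nat × String) :=
  (pvRenameTable.find? (fun e => e.1 == k)).map (·.2)

def pvTail : String :=
  "  --primary: rgb(var(--primary-500));\n" ++
  "  --secondary: rgb(var(--secondary-500));\n" ++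
  "  --accent: rgb(var(--accent-500));\n" ++
  "}\n\n"

-- slots.setdefault(target[0], line): insert at the end only if the key is absent
def pvSlotStep (slots : List (Nat × String)) (kv : String × String) : List (Nat × String) :=
  match pvRenameGet kv.1 with
  | none => slots
  | some (i, css) =>
      if slots.any (fun s => s.1 == i) then slots
      else slots ++ [(i, "  --" ++ css ++ ": " ++ kv.2 ++ ";\n")]

def pvSlots (vars : List (String × String)) : List (Nat × String) :=
  vars.foldl pvSlotStep []

-- slots[idx]: dict lookup; never raises in Source B since idx ranges over slots' own keys
def pvSlotLookup (slots : List (Nat × String)) (i : Nat) : Option String :=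
  (slots.find? (fun s => s.1 == i)).map (·.2)

-- the parts appended for one theme: selector, the slot lines in sorted slot order, the tail
def pvBParts (p : String × List (String × String)) : List String :=
  let selector := if p.1 == "nightdrive" then ":root {\n"
                  else "[data-theme=\"" ++ p.1 ++ "\"] {\n"
  let slots := pvSlots p.2
  selector :: ((PySem.List.sorted (slots.map (·.1)) (fun i => i) false).filterMap
                 (pvSlotLookup slots)) ++ [pvTail]

def generate_semantic_themes_alt (theme_blocks : List (String × List (String × String))) : String :=
  String.join (theme_blocks.foldl (fun parts p => parts ++ pvBParts p)
    ["/* Matrix Theme Variables - Semantic RGB Format */\n\n"])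

-- ===== PRECONDITION & SPEC =====
def Spec_generate_semantic_themes (theme_blocks : List (String × List (String × String))) (out : String) : Prop := out = generate_semantic_themes_alt theme_blocks
instance (theme_blocks : List (String × List (String × String))) (out : String) : Decidable (Spec_generate_semantic_themes theme_blocks out) := by unfold Spec_generate_semantic_themes; infer_instance

-- ===== CLAIM =====
def Claim_equal_generate_semantic_themes : Prop := ∀ (theme_blocks : List (String × List (String × String))), Dom_generate_semantic_themes theme_blocks → Spec_generate_semantic_themes theme_blocks (generate_semantic_themes theme_blocks)

-- ===== LEMMAS AND PROOFS =====

-- A's 12 conditional lines, as a (source key, css name) table in emission order (proof-side only)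
def pvVarTable : List (String × String) :=
  [("primary", "primary-500"), ("secondary", "secondary-500"), ("accent", "accent-500"),
   ("bg-primary", "bg-primary"), ("bg-secondary", "bg-secondary"), ("bg-tertiary", "bg-tertiary"),
   ("text-primary", "text-primary"), ("text-secondary", "text-secondary"), ("text-accent", "text-accent"),
   ("border-color", "border-primary"),
   ("glow-primary", "glow-primary"), ("glow-secondary", "glow-secondary")]

def pvBlock (theme_name : String) (vars : List (String × String)) : String :=
  let selector := if theme_name == "nightdrive" then ":root {\n"
                  else "[data-theme=\"" ++ theme_name ++ "\"] {\n"
  let lines := String.join (pvVarTable.filterMap (fun kc =>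
    (pvGetVar vars kc.1).map (fun v => "  --" ++ kc.2 ++ ": " ++ v ++ ";\n")))
  selector ++ lines ++ pvTail

-- value the slot at index i holds once all of vars has been scanned (first match per key)
def pvHF (vars : List (String × String)) (i : Nat) : Option String :=
  (pvRenameTable.find? (fun e => e.2.1 == i)).bind (fun e =>
    (pvGetVar vars e.1).map (fun v => "  --" ++ e.2.2 ++ ": " ++ v ++ ";\n"))

def pvSIdx : List Nat := pvRenameTable.map (·.2.1)

theorem pv_optStep (o a b : String) (x : Option String) :
    (match x with | some v => o ++ a ++ v ++ b | none => o)
      = o ++ ((x.map (fun v => a ++ v ++ b)).getD "") := by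
  cases x <;> simp [String.append_assoc]

theorem pv_foldl_append (l : List String) :
    ∀ s : String, l.foldl (fun r t => r ++ t) s = s ++ l.foldl (fun r t => r ++ t) "" := by
  induction l with
  | nil => intro s; simp
  | cons a t ih => intro s; simp only [List.foldl_cons]; rw [ih, ih ("" ++ a)]; simp [String.append_assoc]

theorem pv_join_cons (s : String) (l : List String) :
    String.join (s :: l) = s ++ String.join l := by
  simp only [String.join, List.foldl_cons]
  rw [pv_foldl_append]
  simp

theorem pv_join_append (l1 l2 : List String) :
    String.join (l1 ++ l2) = String.join l1 ++ String.join l2 := by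
  induction l1 with
  | nil => simp [String.join]
  | cons a t ih => simp [pv_join_cons, ih, String.append_assoc]

theorem pv_join_filterMap (g : String × String → Option String) (l : List (String × String)) :
    String.join (l.filterMap g) = String.join (l.map (fun x => (g x).getD "")) := by
  induction l with
  | nil => rfl
  | cons a t ih => cases h : g a <;> simp [h, pv_join_cons, ih]

theorem pv_block_eq (acc : String) (p : String × List (String × String)) :
    pvABody acc p = acc ++ pvBlock p.1 p.2 := by
  simp only [pvABody, pv_optStep]
  simp [pvBlock, pv_join_filterMap, pvVarTable, pvTail, pv_join_cons, ← String.append_assoc]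
  simp [String.append_assoc, String.join]

theorem pv_fold_eq (l : List (String × List (String × String))) :
    ∀ acc : String, l.foldl pvABody acc = acc ++ String.join (l.map (fun p => pvBlock p.1 p.2)) := by
  induction l with
  | nil => intro acc; simp [String.join]
  | cons p t ih =>
      intro acc
      simp [List.foldl_cons, ih, pv_block_eq, pv_join_cons, String.append_assoc]

-- slot keys are injective positions: entries of pvRenameTable, distinct keys and distinct indices
theorem pv_keys_nodup : (pvRenameTable.map (·.1)).Nodup := by decide
theorem pv_idx_nodup : (pvRenameTable.map (·.2.1)).Nodup := by decide

theorem pv_table_inj_key {e e' : String × Nat × String}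
    (he : e ∈ pvRenameTable) (he' : e' ∈ pvRenameTable) (h : e.1 = e'.1) : e = e' :=
  List.inj_on_of_nodup_map pv_keys_nodup he he' h

theorem pv_table_inj_idx {e e' : String × Nat × String}
    (he : e ∈ pvRenameTable) (he' : e' ∈ pvRenameTable) (h : e.2.1 = e'.2.1) : e = e' :=
  List.inj_on_of_nodup_map pv_idx_nodup he he' h

-- find?-by-index of a table member returns exactly that member
theorem pv_find_idx_self {e : String × Nat × String} (he : e ∈ pvRenameTable) :
    pvRenameTable.find? (fun e' => e'.2.1 == e.2.1) = some e := by
  have hs : (pvRenameTable.find? (fun e' => e'.2.1 == e.2.1)).isSome := by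
    rw [List.find?_isSome]; exact ⟨e, he, by simp⟩
  obtain ⟨e', he'⟩ := Option.isSome_iff_exists.mp hs
  have hmem := List.mem_of_find?_eq_some he'
  have hp := List.find?_some he'
  have heq : e' = e := pv_table_inj_idx hmem he (by simpa using hp)
  rw [he', heq]

-- lookup on an assoc list extended at the end
theorem pv_lookup_append (acc : List (Nat × String)) (i0 : Nat) (r : String) (i : Nat) :
    pvSlotLookup (acc ++ [(i0, r)]) i
      = (pvSlotLookup acc i).or (if i = i0 then some r else none) := by
  simp only [pvSlotLookup, List.find?_append]
  cases h : acc.find? (fun s => s.1 == i) with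
  | some a => simp
  | none =>
      by_cases hi : i = i0
      · subst hi; simp [List.find?]
      · have hb : (i0 == i) = false := beq_eq_false_iff_ne.mpr (Ne.symm hi)
        simp [List.find?, hb, hi]

theorem pv_lookup_isSome (acc : List (Nat × String)) (i : Nat) :
    (pvSlotLookup acc i).isSome = acc.any (fun s => s.1 == i) := by
  rw [Bool.eq_iff_iff]
  simp [pvSlotLookup, List.find?_isSome, List.any_eq_true]

-- the central invariant: lookup after folding vars = lookup in acc, else first match in vars
theorem pv_slots_lookup (vars : List (String × String)) :
    ∀ (acc : List (Nat × String)) (i : Nat),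
      pvSlotLookup (vars.foldl pvSlotStep acc) i = (pvSlotLookup acc i).or (pvHF vars i) := by
  induction vars with
  | nil =>
      intro acc i
      simp only [List.foldl_nil, pvHF]
      cases hf : pvRenameTable.find? (fun e => e.2.1 == i) with
      | none => cases pvSlotLookup acc i <;> simp [Option.or]
      | some e => cases pvSlotLookup acc i <;> simp [pvGetVar, List.find?, Option.or]
  | cons kv rest ih =>
      intro acc i
      rw [List.foldl_cons]
      simp only [pvSlotStep]
      cases hr : pvRenameGet kv.1 with
      | none =>
          rw [ih]
          have hnone : pvRenameTable.find? (fun e => e.1 == kv.1) = none := by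
            simp only [pvRenameGet] at hr
            cases h : pvRenameTable.find? (fun e => e.1 == kv.1) with
            | none => rfl
            | some e => rw [h] at hr; simp at hr
          have hk : ∀ e ∈ pvRenameTable, ¬(e.1 = kv.1) := by
            intro e he
            have := List.find?_eq_none.mp hnone e he
            simpa using this
          congr 1
          simp only [pvHF]
          cases hf : pvRenameTable.find? (fun e => e.2.1 == i) with
          | none => simp
          | some e =>
              have hmem := List.mem_of_find?_eq_some hf
              have h1 : ¬(e.1 = kv.1) := hk e hmem
              have h2 : ¬(kv.1 = e.1) := fun h => h1 h.symm
              have hb : (kv.1 == e.1) = false := beq_eq_false_iff_ne.mpr h2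
              simp [pvGetVar, List.find?, hb]
      | some pc =>
          obtain ⟨i0, css⟩ := pc
          simp only [pvRenameGet] at hr
          cases hfind : pvRenameTable.find? (fun e => e.1 == kv.1) with
          | none => rw [hfind] at hr; simp at hr
          | some e0 =>
              rw [hfind] at hr
              simp only [Option.map_some, Option.some.injEq] at hr
              have he0mem := List.mem_of_find?_eq_some hfind
              have he0key : e0.1 = kv.1 := by simpa using List.find?_some hfind
              have he0val : e0.2 = (i0, css) := hr
              dsimp only
              have hcons_ne : ∀ j, j ≠ i0 → pvHF (kv :: rest) j = pvHF rest j := by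
                intro j hj
                simp only [pvHF]
                cases hf : pvRenameTable.find? (fun e => e.2.1 == j) with
                | none => simp
                | some e =>
                    have hmem := List.mem_of_find?_eq_some hf
                    have hpj : e.2.1 = j := by simpa using List.find?_some hf
                    have hne : ¬(e.1 = kv.1) := by
                      intro hk
                      have heq : e = e0 := pv_table_inj_key hmem he0mem (by rw [hk, he0key])
                      apply hj
                      rw [← hpj, heq, he0val]
                    have hne' : ¬(kv.1 = e.1) := fun h => hne h.symm
                    have hb : (kv.1 == e.1) = false := beq_eq_false_iff_ne.mpr hne'
                    simp [pvGetVar, List.find?, hb]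
              by_cases hin : acc.any (fun s => s.1 == i0)
              · rw [if_pos hin, ih]
                by_cases hji : i = i0
                · subst hji
                  have hsome : (pvSlotLookup acc i).isSome := by rw [pv_lookup_isSome]; exact hin
                  obtain ⟨v, hv⟩ := Option.isSome_iff_exists.mp hsome
                  rw [hv]; simp [Option.or]
                · rw [hcons_ne i hji]
              · rw [if_neg hin, ih, pv_lookup_append]
                by_cases hji : i = i0
                · subst hji
                  have hnone : pvSlotLookup acc i = none := by
                    cases h : pvSlotLookup acc i with
                    | none => rfl
                    | some v =>
                        have hs : (pvSlotLookup acc i).isSome := by simp [h]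
                        rw [pv_lookup_isSome] at hs
                        exact absurd hs hin
                  rw [hnone]
                  have he0idx : e0.2.1 = i := by rw [he0val]
                  have hfi : pvRenameTable.find? (fun e' => e'.2.1 == i) = some e0 := by
                    have h := pv_find_idx_self he0mem
                    rwa [he0idx] at h
                  have hb : (kv.1 == e0.1) = true := by simp [he0key]
                  simp [pvHF, hfi, pvGetVar, List.find?, hb, he0val, Option.or]
                · rw [hcons_ne i hji]
                  simp only [if_neg hji]
                  cases pvSlotLookup acc i <;> cases pvHF rest i <;> simp [Option.or]

-- invariant: slot keys are nodup and drawn from the table's index column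
theorem pv_slots_keys_inv (vars : List (String × String)) :
    ∀ acc : List (Nat × String),
      ((acc.map (·.1)).Nodup ∧ ∀ i ∈ acc.map (·.1), i ∈ pvSIdx) →
      (((vars.foldl pvSlotStep acc).map (·.1)).Nodup ∧
        ∀ i ∈ (vars.foldl pvSlotStep acc).map (·.1), i ∈ pvSIdx) := by
  induction vars with
  | nil => intro acc h; simpa using h
  | cons kv rest ih =>
      intro acc ⟨hnd, hmem⟩
      rw [List.foldl_cons]
      simp only [pvSlotStep]
      cases hr : pvRenameGet kv.1 with
      | none => exact ih acc ⟨hnd, hmem⟩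
      | some pc =>
          obtain ⟨i0, css⟩ := pc
          dsimp only
          by_cases hin : acc.any (fun s => s.1 == i0)
          · rw [if_pos hin]; exact ih acc ⟨hnd, hmem⟩
          · rw [if_neg hin]
            apply ih
            constructor
            · rw [List.map_append]
              simp only [List.map_cons, List.map_nil]
              rw [List.nodup_append]
              refine ⟨hnd, by simp, ?_⟩
              intro x hx y hy
              have hy' : y = i0 := by simpa using hy
              subst hy'
              intro hxy
              apply hin
              rw [List.any_eq_true]
              obtain ⟨s, hs, hsi⟩ := List.mem_map.mp hx
              exact ⟨s, hs, by simp [hsi, hxy]⟩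
            · intro i hi
              rw [List.map_append] at hi
              simp only [List.mem_append, List.map_cons, List.map_nil, List.mem_singleton] at hi
              rcases hi with hi | hi
              · exact hmem i hi
              · simp only [pvRenameGet] at hr
                cases hf : pvRenameTable.find? (fun e => e.1 == kv.1) with
                | none => rw [hf] at hr; simp at hr
                | some e0 =>
                    rw [hf] at hr
                    simp only [Option.map_some, Option.some.injEq] at hr
                    have hmem0 := List.mem_of_find?_eq_some hf
                    have hidx : e0.2.1 = i0 := by rw [hr]
                    rw [hi, ← hidx]
                    exact List.mem_map_of_mem hmem0

-- the sorted slot keys are exactly the table indices (in table order) whose slot is filled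
theorem pv_sorted_keys (vars : List (String × String)) :
    PySem.List.sorted ((pvSlots vars).map (·.1)) (fun i => i) false
      = pvSIdx.filter (fun i => (pvSlotLookup (pvSlots vars) i).isSome) := by
  have hinv := pv_slots_keys_inv vars [] ⟨by simp, by simp⟩
  apply PySem.List.sorted_eq_of_perm_of_pairwise_lt
  · apply (List.perm_ext_iff_of_nodup (List.Nodup.filter _ (by decide)) hinv.1).mpr
    intro i
    simp only [List.mem_filter]
    constructor
    · intro ⟨_, hsome⟩
      rw [pv_lookup_isSome, List.any_eq_true] at hsome
      obtain ⟨s, hs, hsi⟩ := hsome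
      simp only [beq_iff_eq] at hsi
      exact hsi ▸ List.mem_map_of_mem hs
    · intro hi
      refine ⟨hinv.2 i hi, ?_⟩
      rw [pv_lookup_isSome, List.any_eq_true]
      obtain ⟨s, hs, hsi⟩ := List.mem_map.mp hi
      exact ⟨s, hs, by simp [hsi]⟩
  · have hsub : (pvSIdx.filter (fun i => (pvSlotLookup (pvSlots vars) i).isSome)).Sublist pvSIdx :=
      List.filter_sublist
    exact List.Pairwise.sublist hsub (by decide)

-- filterMap only sees the entries where the function fires
theorem pv_filterMap_filter {α β : Type} (f : α → Option β) (l : List α) :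
    (l.filter (fun x => (f x).isSome)).filterMap f = l.filterMap f := by
  induction l with
  | nil => rfl
  | cons a t ih => cases h : f a <;> simp [h, ih]

-- B's block for one theme equals A's block
theorem pv_bparts_eq (p : String × List (String × String)) :
    String.join (pvBParts p) = pvBlock p.1 p.2 := by
  simp only [pvBParts, pvBlock]
  rw [pv_join_append, pv_join_cons]
  have hall : ∀ i, pvSlotLookup (pvSlots p.2) i = pvHF p.2 i := fun i => by
    have := pv_slots_lookup p.2 [] i
    simpa [pvSlots, pvSlotLookup, List.find?] using this
  have hlines : String.join ((PySem.List.sorted ((pvSlots p.2).map (·.1)) (fun i => i) false).filterMap (pvSlotLookup (pvSlots p.2)))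
      = String.join (pvVarTable.filterMap (fun kc => (pvGetVar p.2 kc.1).map (fun v => "  --" ++ kc.2 ++ ": " ++ v ++ ";\n"))) := by
    rw [pv_sorted_keys, List.filterMap_congr (fun i _ => hall i),
        List.filter_congr (fun i _ => by rw [hall i]), pv_filterMap_filter]
    have hfm : ∀ {α β : Type} (f : α → Option β) (a : α) (l : List α),
        List.filterMap f (a :: l) = (f a).toList ++ List.filterMap f l := by
      intro α β f a l; cases h : f a <;> simp [h]
    have hev : pvSIdx.filterMap (pvHF p.2) = pvVarTable.filterMap (fun kc => (pvGetVar p.2 kc.1).map (fun v => "  --" ++ kc.2 ++ ": " ++ v ++ ";\n")) := by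
      simp [pvSIdx, pvRenameTable, pvHF, pvVarTable, hfm, List.find?]
    rw [hev]
  rw [hlines]
  simp [String.join, String.append_assoc]

theorem pv_bfold_eq (l : List (String × List (String × String))) :
    ∀ parts : List String,
      String.join (l.foldl (fun ps p => ps ++ pvBParts p) parts)
        = String.join parts ++ String.join (l.map (fun p => pvBlock p.1 p.2)) := by
  induction l with
  | nil => intro parts; simp [String.join]
  | cons p t ih =>
      intro parts
      rw [List.foldl_cons, ih, pv_join_append, pv_bparts_eq]
      simp [pv_join_cons, String.append_assoc]

-- ===== VERDICT =====
theorem generate_semantic_themes_spec : Claim_equal_generate_semantic_themes := by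
  intro tb _
  show _ = _
  unfold generate_semantic_themes generate_semantic_themes_alt
  rw [pv_fold_eq, pv_bfold_eq]
  simp [String.join]
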